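-- pv_equiv track=rewrite | github.com/alextoritsin/Algorithms-Specialization | 04_Algorithms_on_Strings/week2/bwmatching.py | PreprocessBWT
-- ===== SOURCE A (Python) =====
-- def PreprocessBWT(bwt:str):
--     """
--     Preprocess the Burrows-Wheeler Transform bwt of some text
--     and compute as a result:
--     * starts - for each character C in bwt, starts[C] is the first position
--         of this character in the sorted array of
--         all characters of the text.
--     * occ_count_before - for each character C in bwt and each position P in bwt,
--         occ_count_before[C][P] is the number of occurrences of character C in bwt
--         from position 0 to position P inclusive.
--     """
--     first_col = sorted(bwt)
--     count = dict()
--     starts = dict()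
--     for i, char in enumerate(bwt):
--         # compute start of the char
--         if first_col[i] not in starts:
--             starts[first_col[i]] = i
--
--         # compute count dict with arrays for every char
--         for key in count:
--             count[key][i + 1] = count[key][i]
--
--         if char not in count:
--             count[char] = [0] * (len(bwt) + 1)
--             count[char][i + 1] = 1
--         else:
--             count[char][i + 1] = count[char][i] + 1
--
--
--     return starts, count
-- ===== SOURCE B (Python) =====
-- def PreprocessBWT(bwt: str):
--     """Same preprocessing, decomposed: starts from the sorted first column
--     directly, and one independent prefix-count pass per distinct character."""
--     n = len(bwt)
--     starts = {}
--     for i, c in enumerate(sorted(bwt)):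
--         starts.setdefault(c, i)
--     count = {}
--     for c in dict.fromkeys(bwt):
--         arr = [0] * (n + 1)
--         for i, x in enumerate(bwt):
--             arr[i + 1] = arr[i] + (1 if x == c else 0)
--         count[c] = arr
--     return starts, count
-- ===== Notes on version B (the rewrite author's own statement) =====
-- stated objective: simpler
-- what changed: A maintains all per-character count columns in one indexed pass, propagating every array each step; B computes starts independently by setdefault over the sorted first column and builds each distinct character's prefix-count array in its own single pass.
import Mathlib
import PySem

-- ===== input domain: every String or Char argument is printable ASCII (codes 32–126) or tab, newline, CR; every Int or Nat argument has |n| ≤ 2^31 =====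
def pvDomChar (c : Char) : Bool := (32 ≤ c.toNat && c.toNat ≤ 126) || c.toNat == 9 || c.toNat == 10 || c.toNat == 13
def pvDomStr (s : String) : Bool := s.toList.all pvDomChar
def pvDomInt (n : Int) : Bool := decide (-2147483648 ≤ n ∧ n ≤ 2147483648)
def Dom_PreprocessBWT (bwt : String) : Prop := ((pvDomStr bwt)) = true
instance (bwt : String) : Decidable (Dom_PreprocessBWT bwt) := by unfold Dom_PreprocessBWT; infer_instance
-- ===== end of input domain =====

-- B replaces A's single indexed pass that maintains every character's count column at once
-- by independent plainer computations: starts via setdefault over the sorted first column,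
-- and one prefix-count pass per distinct character (objective: simpler; same results).

-- ===== PORT A =====
-- 'for key in count: count[key][i+1] = count[key][i]' updates each key's stored list in
-- place, independently per key: ported exactly as mapping the stored lists (iteration
-- order is irrelevant since no entry reads another).
def pvMapVals (d : PySem.Dict Char (List Int)) (f : List Int → List Int) :
    PySem.Dict Char (List Int) :=
  PySem.Dict.mk (d.items.map (fun p => (p.1, f p.2)))

-- the starts-updating part of A's loop body
def pvAStartsStep (first_col : List Char) (d : PySem.Dict Char Int) (p : Int × Char) :
    PySem.Dict Char Int :=
  let fc := PySem.List.pyGetD first_col p.1 ' '  -- p.1 is always in range; default unreachable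
  if d.contains fc then d else d.insert fc p.1

-- the count-updating part of A's loop body
def pvACountStep (n : Nat) (d : PySem.Dict Char (List Int)) (p : Int × Char) :
    PySem.Dict Char (List Int) :=
  let d := pvMapVals d (fun arr => PySem.List.pySetD arr (p.1 + 1) (PySem.List.pyGetD arr p.1 0))
  if d.contains p.2 then
    d.modify p.2 [] (fun arr => PySem.List.pySetD arr (p.1 + 1) (PySem.List.pyGetD arr p.1 0 + 1))
  else
    d.insert p.2 (PySem.List.pySetD (List.replicate (n + 1) (0 : Int)) (p.1 + 1) 1)

def PreprocessBWT (bwt : String) : (List (String × Int)) × (List (String × List Int)) :=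
  let cs := bwt.toList
  let first_col := PySem.List.sorted cs (fun c => c) false
  let st := (PySem.List.enumerate cs 0).foldl
    (fun st p => (pvAStartsStep first_col st.1 p, pvACountStep cs.length st.2 p))
    (PySem.Dict.empty, PySem.Dict.empty)
  (st.1.items.map (fun p => (String.singleton p.1, p.2)),
   st.2.items.map (fun p => (String.singleton p.1, p.2)))

-- ===== PORT B =====
-- the per-character prefix-count pass of Source B
def pvBArr (cs : List Char) (c : Char) : List Int :=
  (PySem.List.enumerate cs 0).foldl
    (fun arr p => PySem.List.pySetD arr (p.1 + 1)
      (PySem.List.pyGetD arr p.1 0 + (if p.2 = c then 1 else 0)))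
    (List.replicate (cs.length + 1) (0 : Int))

def PreprocessBWT_alt (bwt : String) : (List (String × Int)) × (List (String × List Int)) :=
  let cs := bwt.toList
  let starts := (PySem.List.enumerate (PySem.List.sorted cs (fun c => c) false) 0).foldl
    (fun d p => PySem.Dict.setdefault d p.2 p.1) PySem.Dict.empty
  let count := (PySem.List.dedup cs).foldl
    (fun (d : PySem.Dict Char (List Int)) c => d.insert c (pvBArr cs c)) PySem.Dict.empty
  (starts.items.map (fun p => (String.singleton p.1, p.2)),
   count.items.map (fun p => (String.singleton p.1, p.2)))

-- ===== PRECONDITION & SPEC =====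
def Spec_PreprocessBWT (bwt : String) (out : (List (String × Int)) × (List (String × List Int))) : Prop := out = PreprocessBWT_alt bwt
instance (bwt : String) (out : (List (String × Int)) × (List (String × List Int))) : Decidable (Spec_PreprocessBWT bwt out) := by unfold Spec_PreprocessBWT; infer_instance

-- ===== CLAIM (what is proved, stated in full; the proofs are below) =====
def Claim_equal_PreprocessBWT : Prop := ∀ (bwt : String), Dom_PreprocessBWT bwt → Spec_PreprocessBWT bwt (PreprocessBWT bwt)

-- ===== LEMMAS AND PROOFS =====

-- the content of a count column after the first m positions have been processed
def arrA (cs : List Char) (m : Nat) (c : Char) : List Int :=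
  (List.range (cs.length + 1)).map (fun j => if j ≤ m then ((cs.take j).count c : Int) else 0)

lemma arrA_zero (cs : List Char) (c : Char) :
    arrA cs 0 c = List.replicate (cs.length + 1) 0 := by
  unfold arrA
  apply List.ext_getElem
  · simp
  · intro i h1 h2
    simp only [List.getElem_map, List.getElem_range, List.getElem_replicate]
    split
    · rename_i h
      have hi : i = 0 := by omega
      subst hi; simp
    · rfl

lemma arrA_get (cs : List Char) (m : Nat) (c : Char) (hm : m ≤ cs.length) :
    PySem.List.pyGetD (arrA cs m c) (m : Int) 0 = ((cs.take m).count c : Int) := by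
  rw [PySem.List.pyGetD_natCast]
  have hlen : m < (arrA cs m c).length := by simp [arrA]; omega
  rw [List.getD_eq_getElem _ _ hlen]
  simp [arrA]

lemma arrA_succ (cs : List Char) (m : Nat) (c : Char) :
    PySem.List.pySetD (arrA cs m c) ((m : Int) + 1) ((cs.take (m+1)).count c : Int)
      = arrA cs (m+1) c := by
  have h : ((m : Int) + 1) = ((m + 1 : Nat) : Int) := by push_cast; ring
  rw [h, PySem.List.pySetD_natCast]
  apply List.ext_getElem
  · simp [arrA]
  · intro i h1 h2
    simp only [arrA, List.getElem_set, List.getElem_map, List.getElem_range]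
    split_ifs with h3 h4 h5 h6 <;> try (first | rfl | omega)
    · subst h3; rfl

lemma cnt_take_succ (cs : List Char) (m : Nat) (x c : Char) (hx : cs[m]? = some x) :
    ((cs.take (m+1)).count c : Int)
      = ((cs.take m).count c : Int) + (if x = c then 1 else 0) := by
  rw [List.take_add_one, hx]
  simp [List.count_append, List.count_singleton]

lemma get?_pvMapVals_list (l : List (Char × List Int)) (f : List Int → List Int) (c : Char) :
    (pvMapVals (PySem.Dict.mk l) f).get? c = ((PySem.Dict.mk l).get? c).map f := by
  induction l with
  | nil => rfl
  | cons p rest ih =>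
    show (PySem.Dict.mk ((p.1, f p.2) :: rest.map (fun q => (q.1, f q.2)))).get? c = _
    rw [PySem.Dict.get?_mk_cons, PySem.Dict.get?_mk_cons]
    by_cases h : p.1 == c
    · simp [h]
    · simp only [h, Bool.false_eq_true, if_false]
      exact ih

lemma get?_pvMapVals (d : PySem.Dict Char (List Int)) (f : List Int → List Int) (c : Char) :
    (pvMapVals d f).get? c = (d.get? c).map f := by
  obtain ⟨l⟩ := d; exact get?_pvMapVals_list l f c

lemma keys_pvMapVals (d : PySem.Dict Char (List Int)) (f : List Int → List Int) :
    (pvMapVals d f).keys = d.keys := by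
  obtain ⟨l⟩ := d
  simp [pvMapVals, PySem.Dict.keys, List.map_map, Function.comp]

lemma dedup_append_singleton (l : List Char) (x : Char) :
    PySem.List.dedup (l ++ [x])
      = if x ∈ l then PySem.List.dedup l else PySem.List.dedup l ++ [x] := by
  simp only [PySem.List.dedup_eq_ofList, PySem.Set.ofList_eq_foldl, List.foldl_append,
    List.foldl_cons, List.foldl_nil]
  by_cases h : x ∈ l <;>
    simp [PySem.Set.add, PySem.Set.contains, ← PySem.Set.ofList_eq_foldl,
      PySem.Set.mem_ofList, h]

-- the invariant of A's count loop
def InvA (cs : List Char) (m : Nat) (d : PySem.Dict Char (List Int)) : Prop :=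
  d.keys = PySem.List.dedup (cs.take m) ∧
  ∀ c, d.getD c [] = if c ∈ cs.take m then arrA cs m c else []

lemma invA_step (cs : List Char) (m : Nat) (x : Char) (hx : cs[m]? = some x)
    (d : PySem.Dict Char (List Int)) (h : InvA cs m d) :
    InvA cs (m+1) (pvACountStep cs.length d ((m : Int), x)) := by
  obtain ⟨hk, hg⟩ := h
  have hmn : m < cs.length := by
    rcases List.getElem?_eq_some_iff.mp hx with ⟨h, _⟩; exact h
  have htake : cs.take (m+1) = cs.take m ++ [x] := by
    rw [List.take_add_one, hx]; rfl
  have hcmem : ∀ c, d.contains c = decide (c ∈ cs.take m) := by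
    intro c
    rw [PySem.Dict.contains_eq_decide_mem_keys, hk]
    simp [PySem.List.mem_dedup]
  have hget? : ∀ c, c ∈ cs.take m → d.get? c = some (arrA cs m c) := by
    intro c hc
    have hcon : d.contains c = true := by rw [hcmem]; simp [hc]
    rw [PySem.Dict.contains_eq_isSome_get?] at hcon
    obtain ⟨w, hw⟩ := Option.isSome_iff_exists.mp hcon
    have hgd := hg c
    rw [PySem.Dict.getD_eq_get?_getD, hw] at hgd
    simp only [Option.getD_some, hc, if_true] at hgd
    rw [hw, hgd]
  have hget?n : ∀ c, c ∉ cs.take m → d.get? c = none := by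
    intro c hc
    rw [PySem.Dict.get?_eq_none_iff_contains, hcmem]
    simp [hc]
  unfold pvACountStep
  set F : List Int → List Int :=
    fun arr => PySem.List.pySetD arr ((m : Int) + 1) (PySem.List.pyGetD arr (m : Int) 0) with hF
  have hg1 : ∀ c, (pvMapVals d F).getD c [] =
      if c ∈ cs.take m then F (arrA cs m c) else [] := by
    intro c
    rw [PySem.Dict.getD_eq_get?_getD, get?_pvMapVals]
    by_cases hc : c ∈ cs.take m
    · rw [hget? c hc]; simp [hc]
    · rw [hget?n c hc]; simp [hc]
  have hk1 : (pvMapVals d F).keys = PySem.List.dedup (cs.take m) := by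
    rw [keys_pvMapVals, hk]
  have hc1 : ∀ c, (pvMapVals d F).contains c = decide (c ∈ cs.take m) := by
    intro c
    rw [PySem.Dict.contains_eq_decide_mem_keys, hk1]
    simp [PySem.List.mem_dedup]
  -- F applied to a character other than the current one finishes its column
  have hFne : ∀ c, c ≠ x → F (arrA cs m c) = arrA cs (m+1) c := by
    intro c hc
    rw [hF]
    simp only
    rw [arrA_get _ _ _ (le_of_lt hmn)]
    have : ((cs.take m).count c : Int) = ((cs.take (m+1)).count c : Int) := by
      rw [cnt_take_succ cs m x c hx]
      simp [Ne.symm hc]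
    rw [this, arrA_succ]
  by_cases hmem : x ∈ cs.take m
  · -- character already present: modify branch
    simp only [hc1 x, hmem, decide_true, if_true]
    constructor
    · rw [PySem.Dict.keys_modify,
        PySem.Dict.keys_insert_of_contains _ _ (by rw [hc1]; simp [hmem]), hk1, htake,
        dedup_append_singleton]
      simp [hmem]
    · intro c
      rw [PySem.Dict.getD_modify]
      by_cases hcx : c = x
      · rw [if_pos hcx, hcx, hg1]
        simp only [hmem, if_true]
        have hcmem1 : x ∈ cs.take (m+1) := by rw [htake]; simp
        rw [if_pos hcmem1, hF]
        simp only
        rw [arrA_get _ _ _ (le_of_lt hmn)]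
        have hcast : ((m : Int) + 1) = ((m + 1 : Nat) : Int) := by push_cast; ring
        rw [hcast]
        rw [PySem.List.pyGetD_pySetD_natCast _ _ _ _ _
          (by simp [arrA]; omega : m + 1 < (arrA cs m x).length)]
        rw [if_neg (by omega : ¬ m = m + 1)]
        rw [arrA_get _ _ _ (le_of_lt hmn)]
        rw [PySem.List.pySetD_natCast, PySem.List.pySetD_natCast, List.set_set]
        have hv : ((cs.take m).count x : Int) + 1 = ((cs.take (m+1)).count x : Int) := by
          rw [cnt_take_succ cs m x x hx]; simp
        rw [hv, ← PySem.List.pySetD_natCast, ← hcast, arrA_succ]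
      · rw [if_neg hcx, hg1]
        have hiff : c ∈ cs.take (m+1) ↔ c ∈ cs.take m := by rw [htake]; simp [hcx]
        by_cases hc : c ∈ cs.take m
        · rw [hFne c hcx]; simp [hc, hiff]
        · simp [hc, hiff]
  · -- fresh character: insert branch
    simp only [hc1 x, hmem, decide_false, Bool.false_eq_true, if_false]
    have hfresh : PySem.List.pySetD (List.replicate (cs.length + 1) (0 : Int)) ((m : Int) + 1) 1
        = arrA cs (m+1) x := by
      have hcast : ((m : Int) + 1) = ((m + 1 : Nat) : Int) := by push_cast; ring
      rw [hcast, PySem.List.pySetD_natCast]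
      apply List.ext_getElem
      · simp [arrA]
      · intro i h1 h2
        simp only [List.getElem_set, List.getElem_replicate, arrA, List.getElem_map,
          List.getElem_range]
        by_cases hi : i = m + 1
        · subst hi
          simp only [if_pos rfl, if_pos (le_refl _)]
          have : (cs.take (m+1)).count x = 1 := by
            rw [htake, List.count_append]
            have h0 : (cs.take m).count x = 0 := by
              exact List.count_eq_zero.mpr hmem
            simp [h0]
          simp [this]
        · rw [if_neg (fun hh => hi hh.symm)]
          split
          · rename_i hle
            have him : i ≤ m := by omega
            have h0 : (cs.take i).count x = 0 := by
              apply List.count_eq_zero.mpr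
              intro hmem'
              apply hmem
              have ht : List.take i cs = List.take i (List.take m cs) := by
                rw [List.take_take]
                congr 1
                omega
              rw [ht] at hmem'
              exact List.mem_of_mem_take hmem'
            simp [h0]
          · rfl
    constructor
    · rw [PySem.Dict.keys_insert_of_not_contains _ _ (by rw [hc1]; simp [hmem]), hk1, htake,
        dedup_append_singleton]
      simp [hmem]
    · intro c
      rw [PySem.Dict.getD_insert]
      by_cases hcx : c = x
      · subst hcx
        simp only [if_pos rfl]
        rw [hfresh]
        have : c ∈ cs.take (m+1) := by rw [htake]; simp
        simp [this]
      · simp only [hcx, if_false]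
        rw [hg1]
        have hiff : c ∈ cs.take (m+1) ↔ c ∈ cs.take m := by rw [htake]; simp [hcx]
        by_cases hc : c ∈ cs.take m
        · rw [hFne c hcx]; simp [hc, hiff]
        · simp [hc, hiff]

lemma invA_loop (t : List Char) : ∀ (p : List Char) (d : PySem.Dict Char (List Int)),
    InvA (p ++ t) p.length d →
    InvA (p ++ t) (p ++ t).length
      ((PySem.List.enumerate t (p.length : Int)).foldl
        (fun d q => pvACountStep (p ++ t).length d q) d) := by
  induction t with
  | nil => intro p d h; simpa [PySem.List.enumerate_nil] using h
  | cons x t ih =>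
    intro p d h
    rw [PySem.List.enumerate_cons, List.foldl_cons]
    have hx : (p ++ x :: t)[p.length]? = some x := by
      simp [List.getElem?_append_right]
    have hstep := invA_step (p ++ x :: t) p.length x hx d h
    have hre : p ++ x :: t = (p ++ [x]) ++ t := by simp
    have hlen : (p.length : Int) + 1 = ((p ++ [x]).length : Int) := by simp
    have := ih (p ++ [x]) (pvACountStep (p ++ x :: t).length d ((p.length : Int), x))
      (by rw [← hre]; simpa [List.length_append] using hstep)
    rw [← hre] at this
    simpa [← hlen, List.length_append] using this

lemma pvBArr_loop (t : List Char) : ∀ (p : List Char) (c : Char),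
    (PySem.List.enumerate t (p.length : Int)).foldl
      (fun arr q => PySem.List.pySetD arr (q.1 + 1)
        (PySem.List.pyGetD arr q.1 0 + (if q.2 = c then 1 else 0)))
      (arrA (p ++ t) p.length c)
    = arrA (p ++ t) (p ++ t).length c := by
  induction t with
  | nil => intro p c; simp [PySem.List.enumerate_nil]
  | cons x t ih =>
    intro p c
    rw [PySem.List.enumerate_cons, List.foldl_cons]
    have hx : (p ++ x :: t)[p.length]? = some x := by
      simp [List.getElem?_append_right]
    have hstep :
        PySem.List.pySetD (arrA (p ++ x :: t) p.length c) ((p.length : Int) + 1)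
          (PySem.List.pyGetD (arrA (p ++ x :: t) p.length c) (p.length : Int) 0
            + (if x = c then 1 else 0))
        = arrA (p ++ x :: t) (p.length + 1) c := by
      rw [arrA_get _ _ _ (by simp), ← cnt_take_succ _ _ _ _ hx, arrA_succ]
    rw [hstep]
    have hre : p ++ x :: t = (p ++ [x]) ++ t := by simp
    have hlen : (p.length : Int) + 1 = ((p ++ [x]).length : Int) := by simp
    rw [hre, hlen]
    have := ih (p ++ [x]) c
    simpa [List.length_append] using this

lemma pvBArr_eq (cs : List Char) (c : Char) : pvBArr cs c = arrA cs cs.length c := by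
  have := pvBArr_loop cs [] c
  simpa [pvBArr, arrA_zero] using this

lemma starts_eq (cs : List Char) :
    (PySem.List.enumerate cs 0).foldl
      (fun d p => pvAStartsStep (PySem.List.sorted cs (fun c => c) false) d p) PySem.Dict.empty
    = (PySem.List.enumerate (PySem.List.sorted cs (fun c => c) false) 0).foldl
      (fun d p => PySem.Dict.setdefault d p.2 p.1) PySem.Dict.empty := by
  set fc := PySem.List.sorted cs (fun c => c) false with hfc
  rw [PySem.List.enumerate_eq_map_pyRange cs ' ', PySem.List.enumerate_eq_map_pyRange fc ' ',
    List.foldl_map, List.foldl_map]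
  have hlen : PySem.List.len fc = PySem.List.len cs := by
    simp only [PySem.List.len, hfc, PySem.List.length_sorted]
  rw [hlen]
  have hfun : (fun (d : PySem.Dict Char Int) (j : Int) =>
        pvAStartsStep fc d (j, PySem.List.pyGetD cs j ' '))
      = fun (d : PySem.Dict Char Int) (j : Int) =>
        PySem.Dict.setdefault d (PySem.List.pyGetD fc j ' ') j := by
    funext d j
    unfold pvAStartsStep
    by_cases h : d.contains (PySem.List.pyGetD fc j ' ')
    · simp only [h, if_true]
      rw [PySem.Dict.setdefault_of_contains _ _ h]
    · simp only [h, Bool.false_eq_true, if_false]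
      rw [PySem.Dict.setdefault_of_not_contains _ _ (by simpa using h)]
  rw [hfun]

lemma count_eq (cs : List Char) :
    (PySem.List.enumerate cs 0).foldl (fun d q => pvACountStep cs.length d q) PySem.Dict.empty
    = (PySem.List.dedup cs).foldl
      (fun (d : PySem.Dict Char (List Int)) c => d.insert c (pvBArr cs c)) PySem.Dict.empty := by
  have hinv : InvA cs cs.length
      ((PySem.List.enumerate cs 0).foldl (fun d q => pvACountStep cs.length d q)
        PySem.Dict.empty) := by
    have h0 : InvA ([] ++ cs) ([] : List Char).length PySem.Dict.empty := by
      constructor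
      · simp [PySem.Dict.keys_empty]
      · intro c; simp [PySem.Dict.getD_empty]
    have := invA_loop cs [] PySem.Dict.empty h0
    simpa using this
  obtain ⟨hk, hg⟩ := hinv
  rw [List.take_length] at hk hg
  have hBitems : ((PySem.List.dedup cs).foldl
      (fun (d : PySem.Dict Char (List Int)) c => d.insert c (pvBArr cs c))
      PySem.Dict.empty).items = (PySem.List.dedup cs).map (fun c => (c, pvBArr cs c)) := by
    have := PySem.Dict.items_foldl_insert_fresh (PySem.List.dedup cs) (fun c => c)
      (fun c => pvBArr cs c) PySem.Dict.empty
      (by intro a _; simp [PySem.Dict.contains_empty])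
      (by simpa using PySem.List.nodup_dedup cs)
    simpa using this
  apply PySem.Dict.ext
  rw [hBitems]
  rw [PySem.Dict.items_eq_map_keys _ (by rw [hk]; exact PySem.List.nodup_dedup cs) []]
  rw [hk]
  apply List.map_congr_left
  intro c hc
  have hcmem : c ∈ cs := (PySem.List.mem_dedup cs c).mp hc
  rw [hg c]
  simp [hcmem, pvBArr_eq]

-- ===== VERDICT (by name: the statement is the Claim_ definition above) =====
theorem PreprocessBWT_spec : Claim_equal_PreprocessBWT := by
  intro bwt _
  unfold Spec_PreprocessBWT PreprocessBWT PreprocessBWT_alt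
  dsimp only
  rw [PySem.List.foldl_prod_mk, starts_eq, count_eq]
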